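-- pv_equiv track=rewrite | github.com/kaya53/daily-algorithm | 02_SELF/BOJ/BRONZE/B1292_easy-problem/B1292_easy-problem.py | solution
-- ===== SOURCE A (Python) =====
-- def solution(start, end):
--     idx = 0
--     ls = [0] * (end-start+1)
--     num = 1
--     while True:
--         for _ in range(num):
--             if idx >= start-1:
--                 ls[idx-start+1] = num
--             idx += 1
--             if idx == end:
--                 return sum(ls)
--         num += 1
-- ===== SOURCE B (Python) =====
-- def solution(start, end):
--     # closed-form sum of the 1,2,2,3,3,3,... sequence over positions [max(start,1), end]
--     def block(n):
--         # smallest m >= 1 with m*(m+1)//2 >= n  (n >= 1)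
--         m = 1
--         while m * (m + 1) // 2 < n:
--             m += 1
--         return m
--
--     def prefix(n):
--         # sum of the first n terms of the sequence
--         if n <= 0:
--             return 0
--         m = block(n)
--         return (m - 1) * m * (2 * m - 1) // 6 + m * (n - (m - 1) * m // 2)
--
--     lo = start if start > 1 else 1
--     if lo > end:
--         return 0
--     return prefix(end) - prefix(lo - 1)
-- ===== Notes on version B (the rewrite author's own statement) =====
-- stated objective: faster
-- what changed: A materialises a list of length end-start+1 and walks every position 1..end one by one; B inverts the triangular numbers to find the block of each endpoint and computes the answer as a difference of two closed-form prefix sums (sum-of-squares formula), never touching a list.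
import Mathlib
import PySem

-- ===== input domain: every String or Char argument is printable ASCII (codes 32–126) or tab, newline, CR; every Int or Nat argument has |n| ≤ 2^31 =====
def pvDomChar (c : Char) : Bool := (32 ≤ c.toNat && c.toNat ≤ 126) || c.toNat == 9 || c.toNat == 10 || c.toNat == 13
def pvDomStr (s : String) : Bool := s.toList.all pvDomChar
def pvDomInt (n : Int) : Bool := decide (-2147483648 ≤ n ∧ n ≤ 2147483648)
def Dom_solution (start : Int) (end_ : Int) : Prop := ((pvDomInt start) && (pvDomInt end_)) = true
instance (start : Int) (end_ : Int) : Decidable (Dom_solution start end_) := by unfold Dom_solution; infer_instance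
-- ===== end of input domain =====

-- B replaces A's position-by-position walk over a length-(end-start+1) list by a closed-form
-- difference of two triangular-block prefix sums (objective: faster, asymptotically).

-- ===== PORT A =====
-- inner 'for _ in range(num)' loop: either finishes with updated (ls, idx) or returns sum(ls)
def innerA (s e num : Int) : Nat → Array Int → Int → (Array Int × Int) ⊕ Int
  | 0, ls, idx => Sum.inl (ls, idx)
  | c+1, ls, idx =>
    let ls' := if s - 1 ≤ idx then ls.set! (idx - s + 1).toNat num else ls
    let idx' := idx + 1
    if idx' = e then Sum.inr (ls'.foldl (· + ·) 0)
    else innerA s e num c ls' idx'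

-- 'while True' loop; fuel is an upper bound on the outer iterations (enough whenever end ≥ 1)
def outerA (s e : Int) : Nat → Int → Array Int → Int → Int
  | 0, _, _, _ => 0
  | f+1, num, ls, idx =>
    match innerA s e num num.toNat ls idx with
    | Sum.inr r => r
    | Sum.inl (ls', idx') => outerA s e f (num+1) ls' idx'

def solution (start : Int) (end_ : Int) : Int :=
  outerA start end_ (end_.toNat + 1) 1 (Array.replicate (end_ - start + 1).toNat 0) 0

-- ===== PORT B =====
-- smallest m ≥ 1 with m*(m+1)//2 ≥ n
def blockGo (n m : Int) : Int :=
  if PySem.Int.floordiv (m * (m + 1)) 2 < n then blockGo n (m + 1) else m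
termination_by (n - m).toNat
decreasing_by
  have hb := (PySem.Int.floordiv_eq_iff_of_pos (a := m * (m + 1))
      (q := PySem.Int.floordiv (m * (m + 1)) 2) (by norm_num)).mp rfl
  have h1 : 0 ≤ m * (m - 1) := by
    by_cases h' : 1 ≤ m
    · exact mul_nonneg (by omega) (by omega)
    · nlinarith [mul_nonneg (show (0:Int) ≤ -m by omega) (show (0:Int) ≤ 1 - m by omega)]
  have hm : m ≤ PySem.Int.floordiv (m * (m + 1)) 2 := by nlinarith [hb.1, hb.2]
  omega

def prefB (n : Int) : Int :=
  if n ≤ 0 then 0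
  else
    let m := blockGo n 1
    PySem.Int.floordiv ((m - 1) * m * (2 * m - 1)) 6 + m * (n - PySem.Int.floordiv ((m - 1) * m) 2)

def solution_alt (start : Int) (end_ : Int) : Int :=
  let lo := if 1 < start then start else 1
  if end_ < lo then 0 else prefB end_ - prefB (lo - 1)

-- ===== PRECONDITION & SPEC =====
-- Pre_ excludes end_ ≤ 0, on which A's loop can never hit the 'idx == end' return and
-- walks past the list bounds, raising IndexError.
def Pre_solution (start : Int) (end_ : Int) : Prop := 1 ≤ end_
instance (start : Int) (end_ : Int) : Decidable (Pre_solution start end_) := by unfold Pre_solution; infer_instance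
def pvWitness_solution : Int × Int := (3, 7)

def Spec_solution (start : Int) (end_ : Int) (out : Int) : Prop := out = solution_alt start end_
instance (start : Int) (end_ : Int) (out : Int) : Decidable (Spec_solution start end_ out) := by unfold Spec_solution; infer_instance

-- ===== CLAIM (what is proved, stated in full; the proofs are below) =====
def Claim_equal_solution : Prop := ∀ (start : Int) (end_ : Int), Dom_solution start end_ → Pre_solution start end_ → Spec_solution start end_ (solution start end_)

-- ===== LEMMAS AND PROOFS =====

-- Tt m = m-th triangular number, written exactly as blockGo computes it
def Tt (m : Int) : Int := PySem.Int.floordiv (m * (m + 1)) 2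

-- the value of the k-th term of the sequence 1,2,2,3,3,3,…
def g (k : Int) : Int := blockGo k 1

-- running prefix sums of g, the common reference both ports are reduced to
def sumG : Nat → Int
  | 0 => 0
  | n+1 => sumG n + g ((n : Int) + 1)

theorem fd_add_mul (a b c : Int) (hc : 0 < c) :
    PySem.Int.floordiv (a + b * c) c = PySem.Int.floordiv a c + b := by
  have hb := (PySem.Int.floordiv_eq_iff_of_pos (a := a) (q := PySem.Int.floordiv a c) hc).mp rfl
  refine (PySem.Int.floordiv_eq_iff_of_pos hc).mpr ⟨by nlinarith [hb.1], by nlinarith [hb.2]⟩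

theorem two_Tt (m : Int) : 2 * Tt m = m * (m + 1) := by
  have hb := (PySem.Int.floordiv_eq_iff_of_pos (a := m * (m + 1)) (q := Tt m) (by norm_num)).mp rfl
  have he : ∃ k, m * (m + 1) = 2 * k := by
    rcases Int.even_or_odd m with ⟨k, hk⟩ | ⟨k, hk⟩
    · exact ⟨k * (m + 1), by rw [hk]; ring⟩
    · exact ⟨m * (k + 1), by rw [hk]; ring⟩
  obtain ⟨k, hk⟩ := he
  omega

theorem Tt_succ (m : Int) : Tt (m + 1) = Tt m + (m + 1) := by
  have h : (m + 1) * (m + 1 + 1) = m * (m + 1) + (m + 1) * 2 := by ring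
  unfold Tt
  rw [h, fd_add_mul _ _ _ (by norm_num)]

theorem Tt_mono {a b : Int} (h0 : 0 ≤ a) (h : a ≤ b) : Tt a ≤ Tt b := by
  have ha := two_Tt a; have hb := two_Tt b; nlinarith

theorem Tt_nonneg {a : Int} (h0 : 0 ≤ a) : 0 ≤ Tt a := by
  have := two_Tt a; nlinarith

theorem blockGo_spec (n : Int) : ∀ m : Int, 1 ≤ m → Tt (m - 1) < n →
    1 ≤ blockGo n m ∧ Tt (blockGo n m - 1) < n ∧ n ≤ Tt (blockGo n m) := by
  refine blockGo.induct n (motive := fun m => 1 ≤ m → Tt (m - 1) < n →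
      1 ≤ blockGo n m ∧ Tt (blockGo n m - 1) < n ∧ n ≤ Tt (blockGo n m)) ?_ ?_
  · intro x hx ih h1 _
    rw [blockGo, if_pos hx]
    have hTt : Tt (x + 1 - 1) < n := by
      have : Tt x = PySem.Int.floordiv (x * (x + 1)) 2 := rfl
      simpa [this] using hx
    exact ih (by omega) hTt
  · intro x hx h1 h2
    rw [blockGo, if_neg hx]
    refine ⟨h1, h2, ?_⟩
    have : Tt x = PySem.Int.floordiv (x * (x + 1)) 2 := rfl
    rw [this]; omega

theorem g_char {k : Int} (hk : 1 ≤ k) : 1 ≤ g k ∧ Tt (g k - 1) < k ∧ k ≤ Tt (g k) := by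
  have h0 : Tt (1 - 1) = 0 := by decide
  exact blockGo_spec k 1 le_rfl (by rw [h0]; omega)

theorem g_eq {k m : Int} (hm : 1 ≤ m) (h1 : Tt (m - 1) < k) (h2 : k ≤ Tt m) : g k = m := by
  have hk : 1 ≤ k := by
    have := Tt_nonneg (a := m - 1) (by omega); omega
  obtain ⟨hg1, hg2, hg3⟩ := g_char hk
  by_contra hne
  rcases lt_or_gt_of_ne hne with hlt | hgt
  · have : Tt (g k) ≤ Tt (m - 1) := Tt_mono (by omega) (by omega)
    omega
  · have : Tt m ≤ Tt (g k - 1) := Tt_mono (by omega) (by omega)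
    omega

-- ---- B side: prefB computes sumG ----
def Qf (m : Int) : Int := PySem.Int.floordiv ((m - 1) * m * (2 * m - 1)) 6

theorem Qf_succ (m : Int) : Qf (m + 1) = Qf m + m * m := by
  unfold Qf
  have h : (m + 1 - 1) * (m + 1) * (2 * (m + 1) - 1) = (m - 1) * m * (2 * m - 1) + (m * m) * 6 := by
    ring
  rw [h, fd_add_mul _ _ _ (by norm_num)]

theorem Qf_one : Qf 1 = 0 := by
  unfold Qf; norm_num

theorem Tt_zero : Tt 0 = 0 := by decide

theorem prefB_pos (x : Int) (hx : 1 ≤ x) :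
    prefB x = Qf (g x) + g x * (x - Tt (g x - 1)) := by
  have hP : PySem.Int.floordiv ((blockGo x 1 - 1) * blockGo x 1) 2 = Tt (blockGo x 1 - 1) := by
    unfold Tt; congr 1; ring
  simp only [prefB, if_neg (by omega : ¬ x ≤ 0)]
  rw [hP]
  rfl

theorem prefB_eq_sumG : ∀ n : Nat, prefB (n : Int) = sumG n := by
  intro n
  induction n with
  | zero => simp [prefB, sumG]
  | succ n ih =>
    have hN : ((n + 1 : Nat) : Int) = (n : Int) + 1 := by push_cast; ring
    rw [hN]
    obtain ⟨hm1, hmlt, hmle⟩ := g_char (k := (n : Int) + 1) (by omega)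
    set m := g ((n : Int) + 1) with hmdef
    have hpb : prefB ((n : Int) + 1) = Qf m + m * (((n : Int) + 1) - Tt (m - 1)) :=
      prefB_pos _ (by omega)
    have hsum : sumG (n + 1) = sumG n + g ((n : Int) + 1) := by
      simp [sumG]
    by_cases hcase : Tt (m - 1) < (n : Int)
    · -- n is in the same block as n+1
      have hn1 : 1 ≤ (n : Int) := by
        have := Tt_nonneg (a := m - 1) (by omega); omega
      have hgn : g (n : Int) = m := g_eq hm1 hcase (by omega)
      have hpn : prefB (n : Int) = Qf m + m * ((n : Int) - Tt (m - 1)) := by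
        rw [prefB_pos _ hn1, hgn]
      rw [hsum, ← ih, hpn, hpb, ← hmdef]
      ring
    · -- n+1 starts a new block: n = Tt (m-1)
      have hn : (n : Int) = Tt (m - 1) := by omega
      by_cases hn0 : n = 0
      · subst hn0
        have hTm1 : Tt (m - 1) = 0 := by simpa using hn.symm
        have hm_eq : m = 1 := by
          by_contra hne
          have h2 : 2 ≤ m := by omega
          have := Tt_succ (m - 2)
          have hmono := Tt_nonneg (a := m - 2) (by omega)
          have : Tt (m - 2 + 1) = Tt (m - 2) + (m - 2 + 1) := Tt_succ (m - 2)
          have hmm : m - 2 + 1 = m - 1 := by ring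
          rw [hmm] at this
          omega
        rw [hpb, hsum, hTm1, hm_eq, Qf_one]
        have hg1 : g 1 = m := by simpa using hmdef.symm
        simp [sumG, hg1, hm_eq]
      · have hn1 : 1 ≤ (n : Int) := by omega
        have hm2 : 2 ≤ m := by
          by_contra hne
          have hm_eq : m = 1 := by omega
          rw [hm_eq] at hn
          simp [Tt_zero] at hn
          omega
        have hTstep : Tt (m - 1) = Tt (m - 2) + (m - 1) := by
          have := Tt_succ (m - 2)
          have hmm : m - 2 + 1 = m - 1 := by ring
          rwa [hmm] at this
        have hgn : g (n : Int) = m - 1 := by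
          apply g_eq (by omega)
          · have hmm : m - 1 - 1 = m - 2 := by ring
            rw [hmm]; omega
          · omega
        have hpn : prefB (n : Int) = Qf (m - 1) + (m - 1) * ((n : Int) - Tt (m - 2)) := by
          rw [prefB_pos _ hn1, hgn]
          have hmm : m - 1 - 1 = m - 2 := by ring
          rw [hmm]
        have hQ : Qf m = Qf (m - 1) + (m - 1) * (m - 1) := by
          have := Qf_succ (m - 1)
          have hmm : m - 1 + 1 = m := by ring
          rwa [hmm] at this
        rw [hsum, ← ih, hpn, hpb, ← hmdef, hQ]
        have hval : (n : Int) - Tt (m - 2) = m - 1 := by omega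
        rw [hval]
        have hval2 : ((n : Int) + 1) - Tt (m - 1) = 1 := by omega
        rw [hval2]
        ring

-- ---- A side: the loop writes block values into the list ----

-- model of the list after positions 0 .. p-1 have been processed
def mls (s e p : Int) : List Int :=
  (List.range (e - s + 1).toNat).map
    (fun (j : Nat) => if (j : Int) + s - 1 < p ∧ 0 ≤ (j : Int) + s - 1 then g ((j : Int) + s) else 0)

theorem mls_zero (s e : Int) : mls s e 0 = List.replicate (e - s + 1).toNat 0 := by
  have hmem : ∀ b ∈ mls s e 0, b = 0 := by
    intro b hb
    simp only [mls, List.mem_map, List.mem_range] at hb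
    obtain ⟨j, _, hj⟩ := hb
    rw [if_neg (by omega)] at hj
    omega
  have hlen : (mls s e 0).length = (e - s + 1).toNat := by simp [mls]
  rw [List.eq_replicate_of_mem hmem, hlen]

theorem mls_step (s e p num : Int) (h0 : 0 ≤ p) (hpe : p < e) (hg : g (p + 1) = num) :
    (if s - 1 ≤ p then (mls s e p).set (p - s + 1).toNat num else mls s e p) = mls s e (p + 1) := by
  by_cases hc : s - 1 ≤ p
  · rw [if_pos hc]
    apply List.ext_getElem
    · simp [mls]
    · intro i h1 h2
      simp only [mls, List.length_map, List.length_range] at h2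
      have hiL : i < (e - s + 1).toNat := h2
      rw [List.getElem_set]
      simp only [mls, List.getElem_map, List.getElem_range]
      by_cases hit : (p - s + 1).toNat = i
      · rw [if_pos hit]
        have hi : (i : Int) = p - s + 1 := by omega
        rw [if_pos (by constructor <;> omega)]
        have : (i : Int) + s = p + 1 := by omega
        rw [this, hg]
      · rw [if_neg hit]
        have hne : (i : Int) + s - 1 ≠ p := by omega
        by_cases hcond : (i : Int) + s - 1 < p ∧ 0 ≤ (i : Int) + s - 1
        · rw [if_pos hcond, if_pos (by omega)]
        · rw [if_neg hcond, if_neg (by omega)]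
  · rw [if_neg hc]
    unfold mls
    apply List.map_congr_left
    intro j hj
    have hne : (j : Int) + s - 1 ≠ p := by omega
    by_cases hcond : (j : Int) + s - 1 < p ∧ 0 ≤ (j : Int) + s - 1
    · rw [if_pos hcond, if_pos (by omega)]
    · rw [if_neg hcond, if_neg (by omega)]

theorem innerA_eq (s e num : Int) (hnum : 1 ≤ num) :
    ∀ (c : Nat) (idx : Int), 0 ≤ idx → idx < e →
      Tt (num - 1) ≤ idx → idx + (c : Int) ≤ Tt num →
      innerA s e num c (mls s e idx).toArray idx =
        if idx + (c : Int) < e then Sum.inl ((mls s e (idx + (c : Int))).toArray, idx + (c : Int))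
        else Sum.inr ((mls s e e).foldl (· + ·) 0) := by
  intro c
  induction c with
  | zero =>
    intro idx h0 he _ _
    rw [if_pos (by simpa using he)]
    simp [innerA]
  | succ c ih =>
    intro idx h0 he h1 h2
    have hg : g (idx + 1) = num := g_eq hnum (by omega) (by push_cast at h2; omega)
    have hstep := mls_step s e idx num h0 he hg
    have hstepA : (if s - 1 ≤ idx then (mls s e idx).toArray.set! (idx - s + 1).toNat num
        else (mls s e idx).toArray) = (mls s e (idx + 1)).toArray := by
      rw [← hstep]
      by_cases hc : s - 1 ≤ idx
      · rw [if_pos hc, if_pos hc]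
        simp [Array.set!]
      · rw [if_neg hc, if_neg hc]
    rw [innerA]
    simp only [hstepA]
    by_cases hend : idx + 1 = e
    · rw [if_pos hend]
      rw [if_neg (by push_cast; omega)]
      rw [hend]
      simp
    · rw [if_neg hend]
      have := ih (idx + 1) (by omega) (by omega) (by omega) (by push_cast at h2 ⊢; omega)
      rw [this]
      have harith : idx + 1 + (c : Int) = idx + ((c + 1 : Nat) : Int) := by push_cast; ring
      rw [harith]

theorem outerA_eq (s e : Int) :
    ∀ (f : Nat) (num idx : Int), 1 ≤ num → idx = Tt (num - 1) → 0 ≤ idx → idx < e →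
      (e - idx).toNat < f →
      outerA s e f num (mls s e idx).toArray idx = (mls s e e).foldl (· + ·) 0 := by
  intro f
  induction f with
  | zero => intro _ _ _ _ _ _ hf; omega
  | succ f ih =>
    intro num idx hnum hidx h0 hlt hf
    have hcast : ((num.toNat : Nat) : Int) = num := by omega
    have hTt : idx + (num.toNat : Int) = Tt num := by
      have hstep := Tt_succ (num - 1)
      have hmm : num - 1 + 1 = num := by ring
      rw [hmm] at hstep
      omega
    have hinner := innerA_eq s e num hnum num.toNat idx h0 hlt (by omega) (by omega)
    rw [outerA, hinner]
    by_cases hc : idx + ((num.toNat : Nat) : Int) < e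
    · rw [if_pos hc]
      exact ih (num + 1) (idx + (num.toNat : Int)) (by omega)
        (by rw [hTt]; congr 1; ring) (by omega) (by omega) (by omega)
    · rw [if_neg hc]

theorem sum_range_g (s : Int) : ∀ L : Nat,
    ((List.range L).map (fun (j : Nat) => if 0 ≤ (j : Int) + s - 1 then g ((j : Int) + s) else 0)).foldl (· + ·) 0
      = sumG (s + (L : Int) - 1).toNat - sumG ((if 1 < s then s else 1) - 1).toNat := by
  intro L
  induction L with
  | zero =>
    have h : (s + ((0 : Nat) : Int) - 1).toNat = ((if 1 < s then s else 1) - 1).toNat := by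
      split <;> omega
    rw [List.range_zero, List.map_nil, List.foldl_nil, h]
    ring
  | succ L ih =>
    rw [List.range_succ, List.map_append, List.foldl_append, ih]
    simp only [List.map_cons, List.map_nil, List.foldl_cons, List.foldl_nil]
    by_cases hc : 0 ≤ (L : Int) + s - 1
    · rw [if_pos hc]
      have h1 : (s + ((L + 1 : Nat) : Int) - 1).toNat = (s + (L : Int) - 1).toNat + 1 := by
        push_cast; omega
      rw [h1]
      have h2 : sumG ((s + (L : Int) - 1).toNat + 1)
          = sumG ((s + (L : Int) - 1).toNat) + g (((s + (L : Int) - 1).toNat : Int) + 1) := by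
        simp [sumG]
      rw [h2]
      have h3 : (((s + (L : Int) - 1).toNat : Int) + 1) = (L : Int) + s := by omega
      rw [h3]
      ring
    · rw [if_neg hc]
      have h1 : (s + ((L + 1 : Nat) : Int) - 1).toNat = (s + (L : Int) - 1).toNat := by
        push_cast; omega
      rw [h1]
      ring

theorem mls_at_e (s e : Int) :
    mls s e e = (List.range (e - s + 1).toNat).map
      (fun (j : Nat) => if 0 ≤ (j : Int) + s - 1 then g ((j : Int) + s) else 0) := by
  unfold mls
  apply List.map_congr_left
  intro j hj
  rw [List.mem_range] at hj
  by_cases hc : 0 ≤ (j : Int) + s - 1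
  · rw [if_pos hc, if_pos (by constructor <;> omega)]
  · rw [if_neg hc, if_neg (by omega)]

theorem solution_eq_sumG (s e : Int) (he : 1 ≤ e) :
    solution s e = sumG (s + (((e - s + 1).toNat : Nat) : Int) - 1).toNat
      - sumG ((if 1 < s then s else 1) - 1).toNat := by
  unfold solution
  have hrep : Array.replicate (e - s + 1).toNat 0 = (mls s e 0).toArray := by
    rw [mls_zero s e]; simp
  rw [hrep]
  have h0 : (0 : Int) = Tt (1 - 1) := by rw [show (1:Int) - 1 = 0 by ring, Tt_zero]
  rw [outerA_eq s e (e.toNat + 1) 1 0 (by omega) h0 (by omega) (by omega) (by omega)]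
  rw [mls_at_e, sum_range_g]

-- ===== VERDICT (by name: the statement is the Claim_ definition above) =====
theorem solution_spec : Claim_equal_solution := by
  intro s e _ hpre
  unfold Spec_solution solution_alt
  have he : (1:Int) ≤ e := hpre
  rw [solution_eq_sumG s e he]
  set lo : Int := if 1 < s then s else 1 with hlo
  have hlo1 : 1 ≤ lo := by rw [hlo]; split <;> omega
  by_cases hc : e < lo
  · rw [if_pos hc]
    have hse : e < s := by rw [hlo] at hc; split at hc <;> omega
    have hL : (e - s + 1).toNat = 0 := by omega
    have h2 : (s + (((e - s + 1).toNat : Nat) : Int) - 1).toNat = (lo - 1).toNat := by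
      rw [hL, hlo]; split <;> omega
    rw [h2]; ring
  · rw [if_neg hc]
    have hse : (s + (((e - s + 1).toNat : Nat) : Int) - 1) = e := by
      have : lo ≤ e := by omega
      rw [hlo] at this; split at this <;> omega
    rw [hse]
    have h1 : prefB e = sumG e.toNat := by
      have h : ((e.toNat : Int)) = e := by omega
      rw [← h, prefB_eq_sumG, Int.toNat_natCast]
    have h2 : prefB (lo - 1) = sumG (lo - 1).toNat := by
      have h : (((lo - 1).toNat : Int)) = lo - 1 := by omega
      rw [← h, prefB_eq_sumG, Int.toNat_natCast]
    rw [h1, h2]
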